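-- pv_equiv track=rewrite | github.com/YuCheng21/nkust-genetic-algorithm | Quiz/Quiz_1.py | start_position
-- ===== SOURCE A (Python) =====
-- def start_position(text, key_word):
--     results = []
--     count = 0
--     for key_a, value_a in enumerate(text):
--         for value_b in key_word:
--             # find one character
--             if value_a == value_b:
--                 count += 1
--                 # find all character
--                 if count >= len(key_word):
--                     index = key_a - len(key_word) + 1
--                     string = text[index:index+len(key_word)]
--                     results.append(f'{string}[{index}]')
--                 break
--         # not find all character
--         else:
--             count = 0
--     return results
-- ===== SOURCE B (Python) =====
-- def start_position(text, key_word):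
--     m = len(key_word)
--     results = []
--     if m == 0:
--         return results
--     charset = set(key_word)
--     n = len(text)
--     i = 0
--     while i < n:
--         if text[i] in charset:
--             s = i
--             while i < n and text[i] in charset:
--                 i += 1
--             for j in range(s, i - m + 1):
--                 results.append(f'{text[j:j+m]}[{j}]')
--         else:
--             i += 1
--     return results
-- ===== Notes on version B (the rewrite author's own statement) =====
-- stated objective: faster
-- what changed: A rescans key_word for every text character and keeps a running match counter; B precomputes the key_word character set once, walks text by maximal in-set runs, and emits all windows of each run with one range per run.
import Mathlib
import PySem

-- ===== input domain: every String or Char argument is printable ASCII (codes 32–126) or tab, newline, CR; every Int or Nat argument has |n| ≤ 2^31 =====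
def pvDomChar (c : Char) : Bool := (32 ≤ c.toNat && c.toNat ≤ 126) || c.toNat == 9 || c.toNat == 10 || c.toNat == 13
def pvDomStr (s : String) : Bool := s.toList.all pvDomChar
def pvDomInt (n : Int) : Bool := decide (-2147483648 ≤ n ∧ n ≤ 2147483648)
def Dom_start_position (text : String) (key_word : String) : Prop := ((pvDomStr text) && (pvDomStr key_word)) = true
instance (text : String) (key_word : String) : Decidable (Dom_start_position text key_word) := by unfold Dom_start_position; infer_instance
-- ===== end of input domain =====

-- B replaces A's per-character rescan of key_word by a charset + maximal-run decomposition (emit all windows of each run at once); objective: alternative decomposition, same behaviour.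


-- ===== PORT A =====
-- f'{string}[{index}]' built at the char level (PySem.List.slice = text[index:index+m], PySem.Int.toChars = str(index))
def spEmit (tl : List Char) (m : Int) (idx : Int) : String :=
  String.ofList (PySem.List.slice tl (some idx) (some (idx + m)) ++ ('[' :: PySem.Int.toChars idx ++ [']']))

-- inner 'for value_b in key_word: … break / else: count = 0'
def spInnerA (tl : List Char) (m : Int) (ka : Int) (va : Char) (kw : List Char)
    (st : List String × Int) : List String × Int :=
  match kw with
  | [] => (st.1, 0)
  | vb :: rest =>
    if va = vb then
      let count := st.2 + 1
      if count ≥ m then (st.1 ++ [spEmit tl m (ka - m + 1)], count)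
      else (st.1, count)
    else spInnerA tl m ka va rest st

-- outer 'for key_a, value_a in enumerate(text)'
def spOuterA (tl kw : List Char) (m : Int) : Int → List String × Int → List Char → List String × Int
  | _, st, [] => st
  | ka, st, a :: rest => spOuterA tl kw m (ka + 1) (spInnerA tl m ka a kw st) rest

def start_position (text : String) (key_word : String) : List String :=
  (spOuterA text.toList key_word.toList (key_word.toList.length : Int) 0 ([], 0) text.toList).1

-- ===== PORT B =====
-- inner 'while i < n and text[i] in charset: i += 1' — length of the leading in-charset run
def bTakeRun (cs : PySem.Set Char) : List Char → Nat
  | [] => 0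
  | c :: rest => if PySem.Set.contains cs c then 1 + bTakeRun cs rest else 0

-- outer 'while i < n' walking text by runs
def bLoop (cs : PySem.Set Char) (tl : List Char) (m : Int) (i : Int) (l : List Char) : List String :=
  match l with
  | [] => []
  | c :: rest =>
    if PySem.Set.contains cs c then
      let r := bTakeRun cs rest
      let L : Int := 1 + (r : Int)
      (PySem.List.pyRange i (i + L - m + 1) 1).map (fun j => spEmit tl m j)
        ++ bLoop cs tl m (i + L) (rest.drop r)
    else bLoop cs tl m (i + 1) rest
  termination_by l.length
  decreasing_by
  · simp only [List.length_cons]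
    have : (rest.drop (bTakeRun cs rest)).length ≤ rest.length := by
      rw [List.length_drop]; omega
    omega
  · simp

def start_position_alt (text : String) (key_word : String) : List String :=
  let kw := key_word.toList
  let m : Int := (kw.length : Int)
  if m = 0 then []
  else bLoop (PySem.Set.ofList kw) text.toList m 0 text.toList

-- ===== PRECONDITION & SPEC =====
def Spec_start_position (text : String) (key_word : String) (out : List String) : Prop := out = start_position_alt text key_word
instance (text : String) (key_word : String) (out : List String) : Decidable (Spec_start_position text key_word out) := by unfold Spec_start_position; infer_instance

-- ===== CLAIM (what is proved, stated in full; the proofs are below) =====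
def Claim_equal_start_position : Prop := ∀ (text : String) (key_word : String), Dom_start_position text key_word → Spec_start_position text key_word (start_position text key_word)

-- ===== LEMMAS AND PROOFS =====

-- reference: A's fold as a direct recursion over the remaining text, carrying only the run counter
def specA (tl kw : List Char) (m : Int) : Int → Int → List Char → List String
  | _, _, [] => []
  | c, i, a :: rest =>
    if a ∈ kw then
      (if c + 1 ≥ m then [spEmit tl m (i - m + 1)] else []) ++ specA tl kw m (c + 1) (i + 1) rest
    else specA tl kw m 0 (i + 1) rest

theorem spInnerA_eq (tl : List Char) (m ka : Int) (va : Char) (kw : List Char) (st : List String × Int) :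
    spInnerA tl m ka va kw st =
      if va ∈ kw then
        (st.1 ++ (if st.2 + 1 ≥ m then [spEmit tl m (ka - m + 1)] else []), st.2 + 1)
      else (st.1, 0) := by
  induction kw with
  | nil => simp [spInnerA]
  | cons vb rest ih =>
    by_cases h : va = vb
    · subst h
      simp only [spInnerA, List.mem_cons, true_or, if_true]
      split_ifs with hc <;> simp
    · simp only [spInnerA, if_neg h, ih, List.mem_cons]
      have : (va = vb ∨ va ∈ rest) ↔ va ∈ rest := by tauto
      rw [if_congr this rfl rfl]

theorem spOuterA_eq (tl kw : List Char) (m : Int) (l : List Char) :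
    ∀ (ka c : Int) (res : List String),
      (spOuterA tl kw m ka (res, c) l).1 = res ++ specA tl kw m c ka l := by
  induction l with
  | nil => intro ka c res; simp [spOuterA, specA]
  | cons a rest ih =>
    intro ka c res
    rw [spOuterA, spInnerA_eq]
    by_cases h : a ∈ kw
    · rw [if_pos h]
      rw [ih]
      simp [specA, if_pos h, List.append_assoc]
    · rw [if_neg h, ih]
      simp [specA, if_neg h]

theorem specA_nil_kw (tl : List Char) (m : Int) (c i : Int) (l : List Char) :
    specA tl [] m c i l = [] := by
  induction l generalizing c i with
  | nil => rfl
  | cons a rest ih => simp [specA, ih]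

theorem contains_ofList_iff (kw : List Char) (a : Char) :
    PySem.Set.contains (PySem.Set.ofList kw) a = true ↔ a ∈ kw := by
  rw [PySem.Set.contains_iff, PySem.Set.mem_ofList]

-- specA over the leading in-set run: the emitted window starts, as a pyRange of positions
theorem specA_run (tl kw : List Char) (m : Int) (l : List Char) :
    ∀ (c i : Int),
      specA tl kw m c i l =
        (PySem.List.pyRange (max i (i + m - c - 1)) (i + (bTakeRun (PySem.Set.ofList kw) l : Int)) 1).map
            (fun p => spEmit tl m (p - m + 1))
        ++ specA tl kw m 0 (i + (bTakeRun (PySem.Set.ofList kw) l : Int))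
            (l.drop (bTakeRun (PySem.Set.ofList kw) l)) := by
  induction l with
  | nil =>
    intro c i
    rw [PySem.List.pyRange_one_eq_nil (by simp)]
    simp [specA, bTakeRun]
  | cons a rest ih =>
    intro c i
    by_cases h : a ∈ kw
    · have hc : PySem.Set.contains (PySem.Set.ofList kw) a = true := (contains_ofList_iff kw a).mpr h
      rw [specA, if_pos h, ih (c + 1) (i + 1)]
      have hR : (bTakeRun (PySem.Set.ofList kw) (a :: rest) : Int)
          = 1 + (bTakeRun (PySem.Set.ofList kw) rest : Int) := by
        simp [bTakeRun, h]
      rw [hR]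
      have hdrop : (a :: rest).drop (bTakeRun (PySem.Set.ofList kw) (a :: rest))
          = rest.drop (bTakeRun (PySem.Set.ofList kw) rest) := by
        simp [bTakeRun, h, Nat.add_comm 1, List.drop_succ_cons]
      rw [hdrop]
      have hRnn : (0 : Int) ≤ (bTakeRun (PySem.Set.ofList kw) rest : Int) := Int.natCast_nonneg _
      have htail : i + 1 + (bTakeRun (PySem.Set.ofList kw) rest : Int)
          = i + (1 + (bTakeRun (PySem.Set.ofList kw) rest : Int)) := by ring
      rw [htail]
      have harith : i + 1 + m - (c + 1) - 1 = i + m - c - 1 := by ring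
      rw [harith]
      by_cases hcm : c + 1 ≥ m
      · rw [if_pos hcm]
        rw [max_eq_left (by omega), max_eq_left (by omega)]
        rw [PySem.List.pyRange_one_cons
          (show i < i + (1 + (bTakeRun (PySem.Set.ofList kw) rest : Int)) by omega)]
        simp
      · rw [if_neg hcm]
        rw [max_eq_right (by omega), max_eq_right (by omega)]
        simp
    · have hc : PySem.Set.contains (PySem.Set.ofList kw) a = false := by
        rw [← Bool.not_eq_true, contains_ofList_iff]; exact h
      rw [specA, if_neg h]
      have hR : bTakeRun (PySem.Set.ofList kw) (a :: rest) = 0 := by simp [bTakeRun, h]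
      rw [hR]
      rw [PySem.List.pyRange_one_eq_nil (by simp)]
      simp only [Nat.cast_zero, add_zero, List.map_nil, List.nil_append, List.drop_zero]
      rw [specA, if_neg h]

-- B's window starts [i, i+L-m] are A's emitting positions [i+m-1, i+L-1] shifted by m-1
theorem pyRange_shift_bridge (tl : List Char) (m i R : Int) :
    (PySem.List.pyRange i (i + R - m + 1) 1).map (fun j => spEmit tl m j) =
      (PySem.List.pyRange (i + m - 1) (i + R) 1).map (fun p => spEmit tl m (p - m + 1)) := by
  rw [PySem.List.pyRange_one, PySem.List.pyRange_one, List.map_map, List.map_map]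
  have : i + R - m + 1 - i = i + R - (i + m - 1) := by ring
  rw [this]
  apply List.map_congr_left
  intro k _
  simp only [Function.comp]
  congr 1
  ring

theorem bLoop_eq_specA (tl kw : List Char) (m : Int) (hm : 1 ≤ m) :
    ∀ (n : Nat) (l : List Char), l.length ≤ n → ∀ (i : Int),
      bLoop (PySem.Set.ofList kw) tl m i l = specA tl kw m 0 i l := by
  intro n
  induction n with
  | zero =>
    intro l hl i
    have : l = [] := List.length_eq_zero_iff.mp (Nat.le_zero.mp hl)
    subst this; simp [bLoop, specA]
  | succ n ih =>
    intro l hl i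
    match l with
    | [] => simp [bLoop, specA]
    | a :: rest =>
      by_cases h : a ∈ kw
      · have hc : PySem.Set.contains (PySem.Set.ofList kw) a = true := (contains_ofList_iff kw a).mpr h
        rw [bLoop]
        simp only [hc, if_true]
        rw [specA_run]
        have hR : (bTakeRun (PySem.Set.ofList kw) (a :: rest) : Int)
            = 1 + (bTakeRun (PySem.Set.ofList kw) rest : Int) := by
          simp [bTakeRun, h]
        rw [hR]
        have hdrop : (a :: rest).drop (bTakeRun (PySem.Set.ofList kw) (a :: rest))
            = rest.drop (bTakeRun (PySem.Set.ofList kw) rest) := by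
          simp [bTakeRun, h, Nat.add_comm 1, List.drop_succ_cons]
        rw [hdrop]
        congr 1
        · rw [max_eq_right (by omega)]
          rw [pyRange_shift_bridge tl m i (1 + (bTakeRun (PySem.Set.ofList kw) rest : Int))]
          norm_num
        · rw [ih _ (by
            have hd : (rest.drop (bTakeRun (PySem.Set.ofList kw) rest)).length ≤ rest.length := by
              rw [List.length_drop]; omega
            simp only [List.length_cons] at hl
            omega)]
      · have hc : PySem.Set.contains (PySem.Set.ofList kw) a = false := by
          rw [← Bool.not_eq_true, contains_ofList_iff]; exact h
        rw [bLoop]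
        simp only [hc, Bool.false_eq_true, if_false]
        rw [specA, if_neg h]
        exact ih rest (by simp at hl; omega) (i + 1)

-- ===== VERDICT (by name: the statement is the Claim_ definition above) =====
theorem start_position_spec : Claim_equal_start_position := by
  intro text key_word _
  unfold Spec_start_position start_position start_position_alt
  rw [spOuterA_eq]
  simp only [List.nil_append]
  by_cases hk : key_word.toList = []
  · rw [hk]
    simp [specA_nil_kw]
  · have hm : 1 ≤ (key_word.toList.length : Int) := by
      have : 0 < key_word.toList.length := List.length_pos_iff.mpr hk
      omega
    rw [if_neg (by omega)]
    exact (bLoop_eq_specA text.toList key_word.toList _ hm text.toList.length text.toList le_rfl 0).symm
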